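-- pv_equiv track=rewrite | github.com/ganesh1151/DSA-using-python | 14_Tree/tp.py | evenchar
-- ===== SOURCE A (Python) =====
-- def evenchar(str):
-- 	i=1
-- 	out=""
-- 	for x in str:
-- 		if i%2==0:
-- 			if x in("a","i","o","e","u"):
-- 				out=out+x
-- 		i+=1
-- 	return out
-- ===== SOURCE B (Python) =====
-- def evenchar(str):
--     return "".join(c for c in str[1::2] if c in ("a", "i", "o", "e", "u"))
-- ===== Notes on version B (the rewrite author's own statement) =====
-- stated objective: simpler
-- what changed: Replaces the 1-based parity counter and repeated string-concatenation loop by slicing out the even-position characters with str[1::2] and joining the vowels among them.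
import Mathlib
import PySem

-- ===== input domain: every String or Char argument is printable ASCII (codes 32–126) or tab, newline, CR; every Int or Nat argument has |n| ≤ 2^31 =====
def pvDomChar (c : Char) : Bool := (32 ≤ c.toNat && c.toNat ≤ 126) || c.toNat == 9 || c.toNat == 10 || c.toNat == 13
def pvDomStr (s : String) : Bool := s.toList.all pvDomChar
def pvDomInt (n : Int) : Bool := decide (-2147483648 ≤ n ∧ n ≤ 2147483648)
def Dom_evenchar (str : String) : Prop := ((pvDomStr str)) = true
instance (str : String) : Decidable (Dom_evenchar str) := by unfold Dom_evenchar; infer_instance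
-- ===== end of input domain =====

-- B replaces A's 1-based parity counter and growing-string loop by the slice str[1::2] followed by a vowel filter (simpler decomposition, same result).

-- the tuple ("a","i","o","e","u") of A (and of B), as the chars iteration/filtering compares against
def vowels : List Char := ['a', 'i', 'o', 'e', 'u']

-- ===== PORT A =====
def evenchar (str : String) : String :=
  let st := str.toList.foldl
    (fun (st : Int × List Char) x =>
      let o := if PySem.Int.mod st.1 2 = 0 then
          (if x ∈ vowels then st.2 ++ [x] else st.2) else st.2
      (st.1 + 1, o)) (1, [])
  String.ofList st.2

-- ===== PORT B =====
def evenchar_alt (str : String) : String :=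
  let sel := (PySem.List.slice? str.toList (some 1) none 2).getD []  -- str[1::2]; step 2 ≠ 0, so never none
  String.ofList (sel.filter (fun c => c ∈ vowels))

-- ===== PRECONDITION & SPEC =====
def Spec_evenchar (str : String) (out : String) : Prop := out = evenchar_alt str
instance (str : String) (out : String) : Decidable (Spec_evenchar str out) := by unfold Spec_evenchar; infer_instance

-- ===== CLAIM (what is proved, stated in full; the proofs are below) =====
def Claim_equal_evenchar : Prop := ∀ (str : String), Dom_evenchar str → Spec_evenchar str (evenchar str)

-- ===== LEMMAS AND PROOFS =====

-- the common characterisation: the elements at odd 0-based indices (= even 1-based positions)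
def everyOther {α : Type} : List α → List α
  | [] => []
  | [_] => []
  | _ :: y :: rest => y :: everyOther rest

lemma fm {α : Type} : ∀ (xs : List α),
    List.filterMap (fun k : Nat => xs[1+2*k]?) (List.range (xs.length/2)) = everyOther xs := by
  intro xs
  induction xs using everyOther.induct with
  | case1 => simp [everyOther]
  | case2 x => simp [everyOther]
  | case3 x y rest ih =>
    have hlen : (x :: y :: rest).length / 2 = rest.length / 2 + 1 := by
      simp [List.length_cons]; omega
    rw [hlen, List.range_succ_eq_map]
    rw [List.filterMap_cons]
    simp only [List.filterMap_map]
    have hcomp : ((fun k : Nat => (x :: y :: rest)[1+2*k]?) ∘ (· + 1)) = (fun k : Nat => rest[1+2*k]?) := by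
      funext k
      have h : 1+2*(k+1) = (1+2*k)+1+1 := by omega
      simp [Function.comp, h]
    rw [hcomp, ih]
    simp [everyOther]

lemma slice_everyOther {α : Type} (xs : List α) :
    PySem.List.slice? xs (some 1) none 2 = some (everyOther xs) := by
  cases xs with
  | nil => rfl
  | cons x xs' =>
    simp only [PySem.List.slice?, PySem.List.sliceIndices]
    norm_num
    have hc : (if 0 < xs'.length then (((xs'.length : Int) + 2 - 1) / 2).toNat else 0) = (x :: xs').length / 2 := by
      simp only [List.length_cons]
      split <;> omega
    have hi : (fun k : Nat => (x :: xs')[(1 + 2 * (k : Int)).toNat]?) = (fun k : Nat => (x :: xs')[1+2*k]?) := by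
      funext k
      have ht : (1 + 2 * (k : Int)).toNat = 1 + 2 * k := by omega
      rw [ht]
    rw [hc, hi]
    exact fm _

lemma A_loop : ∀ (xs : List Char) (i : Int) (out : List Char), i % 2 = 1 →
    (xs.foldl (fun (st : Int × List Char) x =>
        let o := if PySem.Int.mod st.1 2 = 0 then
            (if x ∈ vowels then st.2 ++ [x] else st.2) else st.2
        (st.1 + 1, o)) (i, out)).2
    = out ++ (everyOther xs).filter (fun c => c ∈ vowels) := by
  intro xs
  induction xs using everyOther.induct with
  | case1 => simp [everyOther]
  | case2 x =>
    intro i out h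
    have h1 : PySem.Int.mod i 2 ≠ 0 := by
      rw [PySem.Int.mod_eq_emod_of_pos (by omega)]; omega
    simp [List.foldl, everyOther]
    intro hd; omega
  | case3 x y rest ih =>
    intro i out h
    have h1 : PySem.Int.mod i 2 ≠ 0 := by
      rw [PySem.Int.mod_eq_emod_of_pos (by omega)]; omega
    have h2 : PySem.Int.mod (i + 1) 2 = 0 := by
      rw [PySem.Int.mod_eq_emod_of_pos (by omega)]; omega
    have h3 : (i + 1 + 1) % 2 = 1 := by omega
    simp only [List.foldl, h1, h2, if_pos]
    rw [ih (i + 1 + 1) _ h3]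
    simp only [everyOther, List.filter_cons]
    by_cases hy : y ∈ vowels <;> simp [hy]

-- ===== VERDICT (by name: the statement is the Claim_ definition above) =====
theorem evenchar_spec : Claim_equal_evenchar := by
  intro str _
  unfold Spec_evenchar evenchar evenchar_alt
  rw [slice_everyOther]
  simp only [Option.getD_some]
  rw [A_loop str.toList 1 [] (by decide)]
  simp
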